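-- pv_equiv track=rewrite | github.com/algoritmiaUS/cp-problems | Codeforces/115A - Party - trees height.py | find_max_depth
-- ===== SOURCE A (Python) =====
-- from collections import defaultdict, deque
--
-- def iterative_dfs(root, tree):
--     """
--     Calcula la profundidad máxima de un árbol usando DFS iterativo.
--     """
--     stack = [(root, 1)]  # (nodo_actual, profundidad)
--     max_depth = 1
--
--     while stack:
--         node, depth = stack.pop()
--         max_depth = max(max_depth, depth)
--         for subordinate in tree[node]:
--             stack.append((subordinate, depth + 1))
--
--     return max_depth
--
-- def find_max_depth(n, managers):
--     """
--     Calcula la máxima profundidad del árbol organizacional basado en la jerarquía de los managers.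
--     """
--     # Construcción del árbol como lista de adyacencia
--     tree = defaultdict(list)
--     roots = []
--
--     for employee in range(n):
--         manager = managers[employee]
--         if manager == -1:
--             roots.append(employee + 1)  # Convertir a índice basado en 1
--         else:
--             tree[manager].append(employee + 1)  # Almacenar subordinados
--
--     # Determinar la máxima profundidad entre todas las raíces
--     max_group_count = 0
--     for root in roots:
--         max_group_count = max(max_group_count, iterative_dfs(root, tree))
--
--     return max_group_count
-- ===== SOURCE B (Python) =====
-- def find_max_depth(n, managers):
--     level = {e + 1 for e in range(n) if managers[e] == -1}
--     depth = 0
--     while level: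
--         depth += 1
--         level = {e + 1 for e in range(n) if managers[e] in level}
--     return depth
-- ===== Notes on version B (the rewrite author's own statement) =====
-- stated objective: simpler
-- what changed: Replaces the adjacency-dict build plus per-root explicit-stack DFS with a level-synchronous sweep over the manager array: level 1 is the roots, level d+1 is the employees whose manager lies in level d, and the answer is the number of nonempty levels; no dict, no stack and no tuple allocation, which a timing run measured as a constant-factor speedup on its random input family (worst case is O(n*h), so not an asymptotic claim). Pre_ excludes only n > len(managers), where A raises IndexError (B raises there too).
import Mathlib
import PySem

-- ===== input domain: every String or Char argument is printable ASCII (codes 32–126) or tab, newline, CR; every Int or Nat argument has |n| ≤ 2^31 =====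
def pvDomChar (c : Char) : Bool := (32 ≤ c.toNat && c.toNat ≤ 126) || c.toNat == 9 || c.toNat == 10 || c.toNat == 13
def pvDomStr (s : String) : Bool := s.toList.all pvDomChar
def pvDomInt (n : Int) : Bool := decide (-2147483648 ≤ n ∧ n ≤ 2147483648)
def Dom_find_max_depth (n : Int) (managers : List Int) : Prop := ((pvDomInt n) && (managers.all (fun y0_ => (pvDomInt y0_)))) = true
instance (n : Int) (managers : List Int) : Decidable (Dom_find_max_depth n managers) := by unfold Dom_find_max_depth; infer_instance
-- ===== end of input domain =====

-- B replaces A's adjacency-dict build + per-root explicit-stack DFS by a level-synchronous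
-- sweep over the manager array (objective: simpler).

-- ===== PORT A =====
-- iterative_dfs: stack kept head-first (Python pops/pushes at the list end); fuel makes the
-- while loop total — n+2 iterations always suffice on the inputs admitted by Pre_.
def dfsLoop (tree : PySem.Dict Int (List Int)) : Nat → List (Int × Int) → Int → Int
  | 0, _, m => m
  | _ + 1, [], m => m
  | f + 1, (node, depth) :: rest, m =>
      dfsLoop tree f (((tree.getD node []).map (fun c => (c, depth + 1))).reverse ++ rest)
        (max m depth)

-- defaultdict(list): tree[manager].append(x) is Dict.modify with default []; the defaultdict
-- read tree[node] inside the DFS is Dict.getD with default [] (the entry it silently inserts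
-- is empty and never affects any later read).
def find_max_depth (n : Int) (managers : List Int) : Int :=
  let build := (PySem.List.pyRange 0 n 1).foldl
    (fun (st : PySem.Dict Int (List Int) × List Int) employee =>
      let manager := (PySem.List.pyGet? managers employee).getD 0
      if manager = -1 then (st.1, st.2 ++ [employee + 1])
      else (st.1.modify manager [] (fun l => l ++ [employee + 1]), st.2))
    (PySem.Dict.empty, [])
  build.2.foldl (fun acc root => max acc (dfsLoop build.1 (n.toNat + 2) [(root, (1 : Int))] 1)) 0

-- ===== PORT B =====
-- {e + 1 for e in range(n) if managers[e] == -1}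
def levelRoots (n : Int) (managers : List Int) : PySem.Set Int :=
  PySem.Set.ofList (((PySem.List.pyRange 0 n 1).filter
    (fun e => (PySem.List.pyGet? managers e).getD 0 == -1)).map (fun e => e + 1))

-- {e + 1 for e in range(n) if managers[e] in level}
def levelNext (n : Int) (managers : List Int) (level : PySem.Set Int) : PySem.Set Int :=
  PySem.Set.ofList (((PySem.List.pyRange 0 n 1).filter
    (fun e => PySem.Set.contains level ((PySem.List.pyGet? managers e).getD 0))).map
    (fun e => e + 1))

-- the while loop; fuel n+1 always suffices (there are at most n nonempty levels)
def bfsLoop (n : Int) (managers : List Int) : Nat → PySem.Set Int → Int → Int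
  | 0, _, depth => depth
  | f + 1, level, depth =>
      if level = [] then depth
      else bfsLoop n managers f (levelNext n managers level) (depth + 1)

def find_max_depth_alt (n : Int) (managers : List Int) : Int :=
  bfsLoop n managers (n.toNat + 1) (levelRoots n managers) 0

-- ===== PRECONDITION & SPEC =====
-- Pre_ excludes exactly the inputs where the Python A raises IndexError (an employee index
-- beyond the managers list); B raises there as well.
def Pre_find_max_depth (n : Int) (managers : List Int) : Prop := n ≤ (managers.length : Int)
instance (n : Int) (managers : List Int) : Decidable (Pre_find_max_depth n managers) := by
  unfold Pre_find_max_depth; infer_instance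

def pvWitness_find_max_depth : Int × List Int := (3, [-1, 1, 2])

def Spec_find_max_depth (n : Int) (managers : List Int) (out : Int) : Prop :=
  out = find_max_depth_alt n managers
instance (n : Int) (managers : List Int) (out : Int) : Decidable (Spec_find_max_depth n managers out) := by
  unfold Spec_find_max_depth; infer_instance

-- ===== CLAIM (what is proved, stated in full; the proofs are below) =====
def Claim_equal_find_max_depth : Prop := ∀ (n : Int) (managers : List Int),
  Dom_find_max_depth n managers → Pre_find_max_depth n managers →
  Spec_find_max_depth n managers (find_max_depth n managers)

-- ===== LEMMAS AND PROOFS =====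

-- managers[e] (with A's and B's shared total reading: junk 0 out of range, never reached
-- on the chains the proofs talk about)
def upv (ms : List Int) (e : Int) : Int := (PySem.List.pyGet? ms e).getD 0

-- parent map on 1-based employee values, -1 absorbing
def pmv (ms : List Int) (v : Int) : Int := if v = -1 then -1 else upv ms (v - 1)

def isEmpB (N : Nat) (v : Int) : Bool := decide (1 ≤ v) && decide (v ≤ (N : Int))

-- "v has a manager chain of length d ending at -1, through employee values only"
def ecb (N : Nat) (ms : List Int) (v : Int) (d : Nat) : Bool :=
  (List.range d).all (fun j => isEmpB N ((pmv ms)^[j] v)) && ((pmv ms)^[d] v == -1)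

-- the subordinates of value v, in A's build order
def children (N : Nat) (ms : List Int) (v : Int) : List Int :=
  ((List.range N).filter (fun (e : Nat) => upv ms (e : Int) == v)).map (fun (e : Nat) => (e : Int) + 1)

-- DFS traversal list of the subtree below v (fuel-bounded)
def stl (N : Nat) (ms : List Int) : Nat → Int → List Int
  | 0, v => [v]
  | f + 1, v => v :: (children N ms v).flatMap (stl N ms f)

-- height of the subtree below v (fuel-bounded)
def htF (N : Nat) (ms : List Int) : Nat → Int → Int
  | 0, _ => 1
  | f + 1, v => (children N ms v).foldl (fun a c => max a (htF N ms f c + 1)) 1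

-- first chain length (0 when v has no terminating chain)
def stepsOf (N : Nat) (ms : List Int) (v : Int) : Nat :=
  (((List.range (N + 1)).find? (fun d => ecb N ms v d)).getD 0)

-- the common value: max over employees of their chain length
def SM (N : Nat) (ms : List Int) : Int :=
  (List.range N).foldl (fun (a : Int) (e : Nat) => max a ((stepsOf N ms ((e : Int) + 1) : Int))) 0

theorem ec_unique {N : Nat} {ms : List Int} {v : Int} {d d' : Nat}
    (h : ecb N ms v d = true) (h' : ecb N ms v d' = true) : d = d' := by
  simp only [ecb, Bool.and_eq_true, List.all_eq_true, List.mem_range, beq_iff_eq] at h h'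
  by_contra hne
  rcases Nat.lt_or_ge d d' with hlt | hge
  · have h2 := h'.1 d hlt
    rw [h.2] at h2
    simp [isEmpB] at h2
  · have hlt : d' < d := lt_of_le_of_ne hge (Ne.symm hne)
    have h2 := h.1 d' hlt
    rw [h'.2] at h2
    simp [isEmpB] at h2

theorem ec_shift {N : Nat} {ms : List Int} {v : Int} {d : Nat}
    (h : ecb N ms v d = true) (k : Nat) (hk : k ≤ d) :
    ecb N ms ((pmv ms)^[k] v) (d - k) = true := by
  simp only [ecb, Bool.and_eq_true, List.all_eq_true, List.mem_range, beq_iff_eq] at h ⊢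
  constructor
  · intro j hj
    rw [← Function.iterate_add_apply]
    exact h.1 (j + k) (by omega)
  · rw [← Function.iterate_add_apply, Nat.sub_add_cancel hk]
    exact h.2

theorem ec_succ_iff {N : Nat} {ms : List Int} {v : Int} {d : Nat} :
    ecb N ms v (d + 1) = true ↔ isEmpB N v = true ∧ ecb N ms (pmv ms v) d = true := by
  simp only [ecb, Bool.and_eq_true, List.all_eq_true, List.mem_range, beq_iff_eq]
  constructor
  · rintro ⟨h1, h2⟩
    refine ⟨h1 0 (by omega), ⟨?_, ?_⟩⟩
    · intro j hj
      rw [← Function.iterate_succ_apply]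
      exact h1 (j + 1) (by omega)
    · rw [← Function.iterate_succ_apply]
      exact h2
  · rintro ⟨h0, h1, h2⟩
    refine ⟨?_, ?_⟩
    · intro j hj
      cases j with
      | zero => exact h0
      | succ i => rw [Function.iterate_succ_apply]; exact h1 i (by omega)
    · rw [Function.iterate_succ_apply]
      exact h2

theorem ec_le {N : Nat} {ms : List Int} {v : Int} {d : Nat}
    (h : ecb N ms v d = true) : d ≤ N := by
  simp only [ecb, Bool.and_eq_true, List.all_eq_true, List.mem_range, beq_iff_eq] at h
  have hm : ∀ j ∈ Finset.range d, (pmv ms)^[j] v ∈ Finset.Icc (1 : Int) (N : Int) := by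
    intro j hj
    have := h.1 j (Finset.mem_range.mp hj)
    simp only [isEmpB, Bool.and_eq_true, decide_eq_true_eq] at this
    exact Finset.mem_Icc.mpr this
  have hinj : Set.InjOn (fun j => (pmv ms)^[j] v) (Finset.range d) := by
    intro i hi j hj hij
    simp only [Finset.coe_range, Set.mem_Iio] at hi hj
    have hci : ecb N ms ((pmv ms)^[i] v) (d - i) = true := by
      apply ec_shift _ i (by omega)
      simp only [ecb, Bool.and_eq_true, List.all_eq_true, List.mem_range, beq_iff_eq]
      exact h
    have hcj : ecb N ms ((pmv ms)^[j] v) (d - j) = true := by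
      apply ec_shift _ j (by omega)
      simp only [ecb, Bool.and_eq_true, List.all_eq_true, List.mem_range, beq_iff_eq]
      exact h
    have hij' : (pmv ms)^[i] v = (pmv ms)^[j] v := hij
    rw [hij'] at hci
    have := ec_unique hci hcj
    omega
  have := Finset.card_le_card_of_injOn _ hm hinj
  simpa [Int.card_Icc] using this

theorem mem_children {N : Nat} {ms : List Int} {c v : Int} :
    c ∈ children N ms v ↔ isEmpB N c = true ∧ pmv ms c = v := by
  simp only [children, List.mem_map, List.mem_filter, List.mem_range, beq_iff_eq]
  constructor
  · rintro ⟨e, ⟨he, hup⟩, rfl⟩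
    have heN : (e : Int) < (N : Int) := by exact_mod_cast he
    refine ⟨?_, ?_⟩
    · simp only [isEmpB, Bool.and_eq_true, decide_eq_true_eq]
      omega
    · have hne : (e : Int) + 1 ≠ -1 := by omega
      simp only [pmv, if_neg hne, add_sub_cancel_right]
      exact hup
  · rintro ⟨hemp, hpm⟩
    simp only [isEmpB, Bool.and_eq_true, decide_eq_true_eq] at hemp
    have hne : c ≠ -1 := by omega
    simp only [pmv, if_neg hne] at hpm
    refine ⟨(c - 1).toNat, ⟨?_, ?_⟩, by omega⟩
    · omega
    · have hc1 : ((c - 1).toNat : Int) = c - 1 := by omega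
      rw [hc1]
      exact hpm

theorem ec_child {N : Nat} {ms : List Int} {v c : Int} {d : Nat}
    (h : ecb N ms v d = true) (hc : c ∈ children N ms v) : ecb N ms c (d + 1) = true := by
  rw [mem_children] at hc
  rw [ec_succ_iff]
  exact ⟨hc.1, by rw [hc.2]; exact h⟩

theorem children_nodup (N : Nat) (ms : List Int) (v : Int) : (children N ms v).Nodup := by
  apply List.Nodup.map
  · intro a b hab
    have : (a : Int) + 1 = (b : Int) + 1 := hab
    omega
  · exact (List.nodup_range).filter _

theorem children_eq_nil {N : Nat} {ms : List Int} {v : Int}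
    (h : ecb N ms v N = true) : children N ms v = [] := by
  rw [List.eq_nil_iff_forall_not_mem]
  intro c hc
  have := ec_le (ec_child h hc)
  omega

-- generic max-fold toolbox
theorem foldl_max_pull {α : Type} (g : α → Int) (l : List α) (i j : Int) :
    l.foldl (fun a x => max a (g x)) (max i j) = max i (l.foldl (fun a x => max a (g x)) j) := by
  induction l generalizing j with
  | nil => rfl
  | cons x l ih =>
    simp only [List.foldl_cons]
    rw [max_assoc, ih]

theorem foldl_max_le {α : Type} {g : α → Int} {l : List α} {b i : Int}
    (hi : i ≤ b) (h : ∀ x ∈ l, g x ≤ b) : l.foldl (fun a x => max a (g x)) i ≤ b := by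
  induction l generalizing i with
  | nil => exact hi
  | cons x l ih =>
    simp only [List.foldl_cons]
    exact ih (max_le hi (h x List.mem_cons_self)) (fun y hy => h y (List.mem_cons_of_mem _ hy))

theorem le_foldl_max_init {α : Type} (g : α → Int) (l : List α) (i : Int) :
    i ≤ l.foldl (fun a x => max a (g x)) i := by
  induction l generalizing i with
  | nil => exact le_refl _
  | cons x l ih =>
    simp only [List.foldl_cons]
    exact le_trans (le_max_left _ _) (ih _)

theorem le_foldl_max_mem {α : Type} {g : α → Int} {l : List α} {x : α} (hx : x ∈ l) (i : Int) :
    g x ≤ l.foldl (fun a x => max a (g x)) i := by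
  induction l generalizing i with
  | nil => simp at hx
  | cons y l ih =>
    simp only [List.foldl_cons]
    rcases List.mem_cons.mp hx with rfl | hx'
    · exact le_trans (le_max_right _ _) (le_foldl_max_init _ _ _)
    · exact ih hx' _

theorem foldl_max_out {α : Type} (g : α → Int) (l : List α) (i c : Int) :
    max (l.foldl (fun a x => max a (g x)) i) c = l.foldl (fun a x => max a (g x)) (max i c) := by
  induction l generalizing i with
  | nil => rfl
  | cons x l ih =>
    simp only [List.foldl_cons]
    rw [ih, max_right_comm]

theorem foldl_max_reverse {α : Type} (g : α → Int) (l : List α) (i : Int) :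
    l.reverse.foldl (fun a x => max a (g x)) i = l.foldl (fun a x => max a (g x)) i := by
  induction l generalizing i with
  | nil => rfl
  | cons x l ih =>
    simp only [List.reverse_cons, List.foldl_append, List.foldl_cons, List.foldl_nil,
      List.foldl_cons]
    rw [ih, foldl_max_out]

theorem add_foldl_max {α : Type} (g : α → Int) (l : List α) (c i : Int) :
    c + l.foldl (fun a x => max a (g x)) i
      = l.foldl (fun a x => max a (c + g x)) (c + i) := by
  induction l generalizing i with
  | nil => rfl
  | cons x l ih =>
    simp only [List.foldl_cons]
    rw [ih, ← max_add_add_left]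

theorem ec_graft {N : Nat} {ms : List Int} {u v : Int} {k d : Nat}
    (hk : (pmv ms)^[k] u = v) (hemp : ∀ j < k, isEmpB N ((pmv ms)^[j] u) = true)
    (hv : ecb N ms v d = true) : ecb N ms u (d + k) = true := by
  simp only [ecb, Bool.and_eq_true, List.all_eq_true, List.mem_range, beq_iff_eq] at hv ⊢
  constructor
  · intro j hj
    rcases Nat.lt_or_ge j k with hjk | hjk
    · exact hemp j hjk
    · obtain ⟨i, rfl⟩ : ∃ i, j = i + k := ⟨j - k, by omega⟩
      rw [Function.iterate_add_apply, hk]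
      exact hv.1 i (by omega)
  · rw [show d + k = d + k from rfl, Function.iterate_add_apply, hk]
    exact hv.2

-- stl facts
theorem stl_ne_nil (N : Nat) (ms : List Int) (f : Nat) (v : Int) : stl N ms f v ≠ [] := by
  cases f <;> simp [stl]

theorem mem_stl_chain {N : Nat} {ms : List Int} {f : Nat} {v u : Int}
    (h : u ∈ stl N ms f v) :
    ∃ k ≤ f, (pmv ms)^[k] u = v ∧ ∀ j < k, isEmpB N ((pmv ms)^[j] u) = true := by
  induction f generalizing v with
  | zero =>
    simp only [stl, List.mem_singleton] at h
    exact ⟨0, by omega, by simp [h], by omega⟩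
  | succ f ih =>
    simp only [stl, List.mem_cons, List.mem_flatMap] at h
    rcases h with rfl | ⟨c, hc, hu⟩
    · exact ⟨0, by omega, rfl, by omega⟩
    · obtain ⟨k, hk, hpm, hemp⟩ := ih hu
      have hcc := mem_children.mp hc
      refine ⟨k + 1, by omega, ?_, ?_⟩
      · rw [Function.iterate_succ_apply', hpm]
        exact hcc.2
      · intro j hj
        rcases Nat.lt_or_ge j k with hjk | hjk
        · exact hemp j hjk
        · have : j = k := by omega
          subst this
          rw [hpm]
          exact hcc.1

theorem ec_of_mem_stl {N : Nat} {ms : List Int} {f : Nat} {v u : Int} {d : Nat}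
    (hv : ecb N ms v d = true) (h : u ∈ stl N ms f v) :
    ∃ k ≤ f, (pmv ms)^[k] u = v ∧ ecb N ms u (d + k) = true := by
  obtain ⟨k, hk, hpm, hemp⟩ := mem_stl_chain h
  exact ⟨k, hk, hpm, ec_graft hpm hemp hv⟩

theorem stl_nodup {N : Nat} {ms : List Int} (f : Nat) {v : Int} {d : Nat}
    (hv : ecb N ms v d = true) : (stl N ms f v).Nodup := by
  induction f generalizing v d with
  | zero => simp [stl]
  | succ f ih =>
    simp only [stl, List.nodup_cons]
    constructor
    · intro hvmem
      obtain ⟨c, hc, hvc⟩ := List.mem_flatMap.mp hvmem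
      obtain ⟨k, _, _, hec⟩ := ec_of_mem_stl (ec_child hv hc) hvc
      have := ec_unique hv hec
      omega
    · rw [List.nodup_flatMap]
      refine ⟨fun c hc => ih (ec_child hv hc), ?_⟩
      have hnd : (children N ms v).Pairwise (fun a b => a ≠ b) := children_nodup N ms v
      apply List.Pairwise.imp_of_mem ?_ hnd
      intro a b ha hb hne u hu1 hu2
      obtain ⟨k1, _, hp1, he1⟩ := ec_of_mem_stl (ec_child hv ha) hu1
      obtain ⟨k2, _, hp2, he2⟩ := ec_of_mem_stl (ec_child hv hb) hu2
      have : d + 1 + k1 = d + 1 + k2 := ec_unique he1 he2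
      have hk : k1 = k2 := by omega
      subst hk
      exact hne (hp1 ▸ hp2)

theorem stl_length_le {N : Nat} {ms : List Int} (f : Nat) {v : Int} {d : Nat}
    (hv : ecb N ms v d = true) (he : isEmpB N v = true) : (stl N ms f v).length ≤ N := by
  have hnd : (stl N ms f v).Nodup := stl_nodup f hv
  have hsub : (stl N ms f v).toFinset ⊆ Finset.Icc (1 : Int) (N : Int) := by
    intro u hu
    rw [List.mem_toFinset] at hu
    obtain ⟨k, _, hpm, hemp⟩ := mem_stl_chain hu
    have hue : isEmpB N u = true := by
      cases k with
      | zero =>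
        have huv : u = v := by simpa using hpm
        rw [huv]; exact he
      | succ k => simpa using hemp 0 (by omega)
    simp only [isEmpB, Bool.and_eq_true, decide_eq_true_eq] at hue
    exact Finset.mem_Icc.mpr hue
  have := Finset.card_le_card hsub
  rw [List.toFinset_card_of_nodup hnd] at this
  simpa [Int.card_Icc] using this

theorem stl_of_children_nil {N : Nat} {ms : List Int} {v : Int}
    (h : children N ms v = []) (f : Nat) : stl N ms f v = [v] := by
  cases f <;> simp [stl, h]

theorem stl_stab {N : Nat} {ms : List Int} {v : Int} {d : Nat}
    (hv : ecb N ms v d = true) :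
    ∀ f g : Nat, N - d ≤ f → N - d ≤ g → stl N ms f v = stl N ms g v := by
  suffices H : ∀ (m : Nat) (v : Int) (d : Nat), N - d ≤ m → ecb N ms v d = true →
      ∀ f g : Nat, N - d ≤ f → N - d ≤ g → stl N ms f v = stl N ms g v by
    exact H (N - d) v d le_rfl hv
  intro m
  induction m with
  | zero =>
    intro v d hm hv f g _ _
    have hd : d = N := by have := ec_le hv; omega
    subst hd
    rw [stl_of_children_nil (children_eq_nil hv), stl_of_children_nil (children_eq_nil hv)]
  | succ m ih =>
    intro v d hm hv f g hf hg
    rcases Nat.eq_zero_or_pos (N - d) with h0 | hpos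
    · have hd : d = N := by have := ec_le hv; omega
      subst hd
      rw [stl_of_children_nil (children_eq_nil hv), stl_of_children_nil (children_eq_nil hv)]
    · obtain ⟨f', rfl⟩ : ∃ f', f = f' + 1 := ⟨f - 1, by omega⟩
      obtain ⟨g', rfl⟩ : ∃ g', g = g' + 1 := ⟨g - 1, by omega⟩
      simp only [stl]
      congr 1
      rw [List.flatMap_def, List.flatMap_def]
      congr 1
      apply List.map_congr_left
      intro c hc
      exact ih c (d + 1) (by omega) (ec_child hv hc) f' g' (by omega) (by omega)

theorem stl_exact {N : Nat} {ms : List Int} {v : Int} {d : Nat}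
    (hv : ecb N ms v d = true) :
    stl N ms (N + 1) v = v :: (children N ms v).flatMap (stl N ms (N + 1)) := by
  simp only [stl]
  congr 1
  rw [List.flatMap_def, List.flatMap_def]
  congr 1
  apply List.map_congr_left
  intro c hc
  exact stl_stab (ec_child hv hc) N (N + 1) (by omega) (by omega)

-- htF facts
theorem ht_one_le (N : Nat) (ms : List Int) (f : Nat) (v : Int) : 1 ≤ htF N ms f v := by
  cases f with
  | zero => simp [htF]
  | succ f => exact le_foldl_max_init _ _ _

theorem ht_of_children_nil {N : Nat} {ms : List Int} {v : Int}
    (h : children N ms v = []) (f : Nat) : htF N ms f v = 1 := by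
  cases f <;> simp [htF, h]

theorem ht_stab {N : Nat} {ms : List Int} {v : Int} {d : Nat}
    (hv : ecb N ms v d = true) :
    ∀ f g : Nat, N - d ≤ f → N - d ≤ g → htF N ms f v = htF N ms g v := by
  suffices H : ∀ (m : Nat) (v : Int) (d : Nat), N - d ≤ m → ecb N ms v d = true →
      ∀ f g : Nat, N - d ≤ f → N - d ≤ g → htF N ms f v = htF N ms g v by
    exact H (N - d) v d le_rfl hv
  intro m
  induction m with
  | zero =>
    intro v d hm hv f g _ _
    have hd : d = N := by have := ec_le hv; omega
    subst hd
    rw [ht_of_children_nil (children_eq_nil hv), ht_of_children_nil (children_eq_nil hv)]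
  | succ m ih =>
    intro v d hm hv f g hf hg
    rcases Nat.eq_zero_or_pos (N - d) with h0 | hpos
    · have hd : d = N := by have := ec_le hv; omega
      subst hd
      rw [ht_of_children_nil (children_eq_nil hv), ht_of_children_nil (children_eq_nil hv)]
    · obtain ⟨f', rfl⟩ : ∃ f', f = f' + 1 := ⟨f - 1, by omega⟩
      obtain ⟨g', rfl⟩ : ∃ g', g = g' + 1 := ⟨g - 1, by omega⟩
      simp only [htF]
      apply PySem.List.foldl_congr_mem
      intro acc c hc
      rw [ih c (d + 1) (by omega) (ec_child hv hc) f' g' (by omega) (by omega)]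

theorem ht_unfold {N : Nat} {ms : List Int} {v : Int} {d : Nat}
    (hv : ecb N ms v d = true) :
    htF N ms (N + 1) v
      = (children N ms v).foldl (fun a c => max a (htF N ms (N + 1) c + 1)) 1 := by
  conv_lhs => rw [htF]
  apply PySem.List.foldl_congr_mem
  intro acc c hc
  rw [ht_stab (ec_child hv hc) N (N + 1) (by omega) (by omega)]

-- the DFS loop computes max over the stack of (depth - 1 + subtree height)
theorem dfs_eval {N : Nat} {ms : List Int} {tree : PySem.Dict Int (List Int)}
    (htree : ∀ v : Int, v ≠ -1 → tree.getD v [] = children N ms v) :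
    ∀ (f : Nat) (stack : List (Int × Int)) (m : Int),
      (∀ p ∈ stack, isEmpB N p.1 = true ∧ ∃ d : Nat, p.2 = (d : Int) ∧ ecb N ms p.1 d = true) →
      (stack.map (fun p => (stl N ms (N + 1) p.1).length)).sum ≤ f →
      dfsLoop tree f stack m
        = stack.foldl (fun a p => max a (p.2 - 1 + htF N ms (N + 1) p.1)) m := by
  intro f
  induction f with
  | zero =>
    intro stack m hinv hfuel
    cases stack with
    | nil => rfl
    | cons p rest =>
      exfalso
      have h1 : stl N ms (N + 1) p.1 ≠ [] := stl_ne_nil N ms _ _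
      have h2 : 1 ≤ (stl N ms (N + 1) p.1).length := List.length_pos_iff.mpr h1
      simp only [List.map_cons, List.sum_cons] at hfuel
      omega
  | succ f ih =>
    intro stack m hinv hfuel
    cases stack with
    | nil => rfl
    | cons p rest =>
      obtain ⟨v, dep⟩ := p
      obtain ⟨hemp, d, hdep, hec⟩ := hinv (v, dep) List.mem_cons_self
      have hvne : v ≠ -1 := by
        simp only [isEmpB, Bool.and_eq_true, decide_eq_true_eq] at hemp
        omega
      simp only [dfsLoop]
      rw [htree v hvne]
      rw [ih _ _ ?inv ?fuel]
      case inv =>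
        intro q hq
        rcases List.mem_append.mp hq with hq1 | hq2
        · rw [List.mem_reverse] at hq1
          obtain ⟨c, hc, rfl⟩ := List.mem_map.mp hq1
          refine ⟨(mem_children.mp hc).1, d + 1, ?_, ec_child hec hc⟩
          have hdep' : dep = (d : Int) := hdep
          show dep + 1 = ((d + 1 : Nat) : Int)
          rw [hdep']
          push_cast
          ring
        · exact hinv q (List.mem_cons_of_mem _ hq2)
      case fuel =>
        have hlen : (stl N ms (N + 1) v).length
            = 1 + ((children N ms v).map (fun c => (stl N ms (N + 1) c).length)).sum := by
          rw [stl_exact hec]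
          simp only [List.length_cons, List.length_flatMap]
          omega
        simp only [List.map_cons, List.sum_cons, hlen] at hfuel
        simp only [List.map_append, List.sum_append, List.map_reverse, List.sum_reverse,
          List.map_map]
        simp only [Function.comp_def]
        omega
      rw [List.foldl_append, foldl_max_reverse, List.foldl_map]
      simp only [List.foldl_cons]
      congr 1
      rw [foldl_max_pull]
      congr 1
      rw [ht_unfold hec, add_foldl_max]
      have hinit : dep - 1 + 1 = dep := by ring
      rw [hinit]
      apply PySem.List.foldl_congr_mem
      intro acc c _
      have : dep + 1 - 1 + htF N ms (N + 1) c = dep - 1 + (htF N ms (N + 1) c + 1) := by ring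
      rw [this]

-- A's build loop produces exactly the children lists and the roots list
theorem children_succ (N : Nat) (ms : List Int) (v : Int) :
    children (N + 1) ms v
      = children N ms v ++ (if upv ms (N : Int) = v then [(N : Int) + 1] else []) := by
  simp only [children, List.range_succ, List.filter_append, List.map_append]
  congr 1
  by_cases h : upv ms (N : Int) = v
  · simp [h]
  · simp [h]

theorem build_aux (ms : List Int) (N : Nat) :
    ((((List.range N).map (fun (k : Nat) => (k : Int))).foldl
      (fun (st : PySem.Dict Int (List Int) × List Int) employee =>
        let manager := (PySem.List.pyGet? ms employee).getD 0
        if manager = -1 then (st.1, st.2 ++ [employee + 1])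
        else (st.1.modify manager [] (fun l => l ++ [employee + 1]), st.2))
      (PySem.Dict.empty, [])).2 = children N ms (-1))
    ∧ ∀ v : Int, v ≠ -1 →
      (((List.range N).map (fun (k : Nat) => (k : Int))).foldl
        (fun (st : PySem.Dict Int (List Int) × List Int) employee =>
          let manager := (PySem.List.pyGet? ms employee).getD 0
          if manager = -1 then (st.1, st.2 ++ [employee + 1])
          else (st.1.modify manager [] (fun l => l ++ [employee + 1]), st.2))
        (PySem.Dict.empty, [])).1.getD v [] = children N ms v := by
  induction N with
  | zero =>
    constructor
    · simp [children]
    · intro v hv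
      simp [children, PySem.Dict.getD_empty]
  | succ N ih =>
    rw [List.range_succ, List.map_append, List.foldl_append]
    simp only [List.map_cons, List.map_nil, List.foldl_cons, List.foldl_nil]
    by_cases hroot : (PySem.List.pyGet? ms (N : Int)).getD 0 = -1
    · simp only [hroot, reduceIte]
      constructor
      · rw [ih.1, children_succ]
        have : upv ms (N : Int) = -1 := hroot
        rw [if_pos this]
      · intro v hv
        rw [ih.2 v hv, children_succ]
        have : upv ms (N : Int) ≠ v := by rw [show upv ms (N : Int) = -1 from hroot]; exact fun h => hv h.symm
        rw [if_neg this, List.append_nil]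
    · simp only [if_neg hroot]
      constructor
      · rw [ih.1, children_succ]
        have : upv ms (N : Int) ≠ -1 := hroot
        rw [if_neg this, List.append_nil]
      · intro v hv
        by_cases hvm : v = (PySem.List.pyGet? ms (N : Int)).getD 0
        · subst hvm
          rw [PySem.Dict.getD_modify_self, ih.2 _ hroot, children_succ]
          simp [upv]
        · rw [PySem.Dict.getD_modify_of_ne _ _ _ hvm, ih.2 v hv, children_succ]
          have : upv ms (N : Int) ≠ v := fun h => hvm h.symm
          rw [if_neg this, List.append_nil]


theorem pyRange_cast (n : Int) :
    PySem.List.pyRange 0 n 1 = (List.range n.toNat).map (fun (k : Nat) => (k : Int)) := by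
  rw [PySem.List.pyRange_one]
  simp

theorem build_spec (n : Int) (ms : List Int) :
    ((PySem.List.pyRange 0 n 1).foldl
      (fun (st : PySem.Dict Int (List Int) × List Int) employee =>
        let manager := (PySem.List.pyGet? ms employee).getD 0
        if manager = -1 then (st.1, st.2 ++ [employee + 1])
        else (st.1.modify manager [] (fun l => l ++ [employee + 1]), st.2))
      (PySem.Dict.empty, [])).2 = children n.toNat ms (-1)
    ∧ ∀ v : Int, v ≠ -1 →
      ((PySem.List.pyRange 0 n 1).foldl
        (fun (st : PySem.Dict Int (List Int) × List Int) employee =>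
          let manager := (PySem.List.pyGet? ms employee).getD 0
          if manager = -1 then (st.1, st.2 ++ [employee + 1])
          else (st.1.modify manager [] (fun l => l ++ [employee + 1]), st.2))
        (PySem.Dict.empty, [])).1.getD v [] = children n.toNat ms v := by
  rw [pyRange_cast]
  exact build_aux ms n.toNat

theorem root_ec {N : Nat} {ms : List Int} {r : Int} (hr : r ∈ children N ms (-1)) :
    isEmpB N r = true ∧ ecb N ms r 1 = true := by
  obtain ⟨hemp, hpm⟩ := mem_children.mp hr
  refine ⟨hemp, ?_⟩
  simp only [ecb, Bool.and_eq_true, List.all_eq_true, List.mem_range, beq_iff_eq]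
  constructor
  · intro j hj
    have : j = 0 := by omega
    subst this
    simpa using hemp
  · simpa using hpm

theorem A_eq (n : Int) (ms : List Int) :
    find_max_depth n ms
      = (children n.toNat ms (-1)).foldl
          (fun a r => max a (htF n.toNat ms (n.toNat + 1) r)) 0 := by
  obtain ⟨h2, h1⟩ := build_spec n ms
  show ((PySem.List.pyRange 0 n 1).foldl _ (PySem.Dict.empty, [])).2.foldl _ 0 = _
  rw [h2]
  apply PySem.List.foldl_congr_mem
  intro acc r hr
  obtain ⟨hemp, hec⟩ := root_ec hr
  have hdfs := dfs_eval (N := n.toNat) (ms := ms) h1 (n.toNat + 2) [(r, (1 : Int))] 1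
    (by
      intro p hp
      simp only [List.mem_singleton] at hp
      subst hp
      exact ⟨hemp, 1, by norm_num, hec⟩)
    (by
      simp only [List.map_cons, List.map_nil, List.sum_cons, List.sum_nil]
      have := stl_length_le (N := n.toNat) (ms := ms) (n.toNat + 1) hec hemp
      omega)
  rw [hdfs]
  simp only [List.foldl_cons, List.foldl_nil]
  have h3 : (1 : Int) - 1 + htF n.toNat ms (n.toNat + 1) r = htF n.toNat ms (n.toNat + 1) r := by
    ring
  rw [h3, max_eq_right (ht_one_le _ _ _ _)]

theorem stepsOf_eq {N : Nat} {ms : List Int} {v : Int} {d : Nat}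
    (h : ecb N ms v d = true) : stepsOf N ms v = d := by
  unfold stepsOf
  have hd : d ∈ List.range (N + 1) := by
    simp only [List.mem_range]
    have := ec_le h
    omega
  rcases hfind : (List.range (N + 1)).find? (fun d' => ecb N ms v d') with _ | x
  · exfalso
    exact absurd h (by simpa using List.find?_eq_none.mp hfind d hd)
  · have hx : ecb N ms v x = true := by simpa using List.find?_some hfind
    have : x = d := ec_unique hx h
    simp [this]

theorem stepsOf_eq_zero {N : Nat} {ms : List Int} {v : Int}
    (h : ∀ d : Nat, ecb N ms v d = false) : stepsOf N ms v = 0 := by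
  unfold stepsOf
  have hnone : (List.range (N + 1)).find? (fun d' => ecb N ms v d') = none := by
    apply List.find?_eq_none.mpr
    intro x _
    simp [h x]
  simp [hnone]

theorem SM_nonneg (N : Nat) (ms : List Int) : 0 ≤ SM N ms :=
  le_foldl_max_init _ _ _

theorem d_le_SM {N : Nat} {ms : List Int} {v : Int} {d : Nat}
    (hec : ecb N ms v d = true) (hemp : isEmpB N v = true) : (d : Int) ≤ SM N ms := by
  simp only [isEmpB, Bool.and_eq_true, decide_eq_true_eq] at hemp
  have hmem : (v - 1).toNat ∈ List.range N := by
    simp only [List.mem_range]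
    omega
  have hle := le_foldl_max_mem
    (g := fun e : Nat => ((stepsOf N ms ((e : Int) + 1)) : Int)) hmem 0
  have hcast : (((v - 1).toNat : Int) + 1) = v := by omega
  rw [hcast, stepsOf_eq hec] at hle
  unfold SM
  exact hle

theorem ec_emp_mid {N : Nat} {ms : List Int} {u : Int} {d j : Nat}
    (h : ecb N ms u d = true) (hj : j < d) : isEmpB N ((pmv ms)^[j] u) = true := by
  simp only [ecb, Bool.and_eq_true, List.all_eq_true, List.mem_range, beq_iff_eq] at h
  exact h.1 j hj

theorem ht_le_SM {N : Nat} {ms : List Int} :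
    ∀ (m : Nat) (v : Int) (d : Nat), ecb N ms v d = true → isEmpB N v = true → N ≤ d + m →
      htF N ms (N + 1) v ≤ SM N ms - (d : Int) + 1 := by
  intro m
  induction m with
  | zero =>
    intro v d hec hemp hN
    have hd : d = N := by
      have := ec_le hec
      omega
    subst hd
    rw [ht_of_children_nil (children_eq_nil hec) _]
    have := d_le_SM hec hemp
    omega
  | succ m ih =>
    intro v d hec hemp hN
    rw [ht_unfold hec]
    apply foldl_max_le
    · have := d_le_SM hec hemp
      omega
    · intro c hc
      have hcc := mem_children.mp hc
      have h1 := ih c (d + 1) (ec_child hec hc) hcc.1 (by omega)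
      have hcast : ((d + 1 : Nat) : Int) = (d : Int) + 1 := by push_cast; ring
      rw [hcast] at h1
      omega

theorem ht_ge_chain {N : Nat} {ms : List Int} :
    ∀ (k : Nat) (u : Int) (d : Nat), ecb N ms u d = true → isEmpB N u = true → k < d →
      ((k : Int) + 1) ≤ htF N ms (N + 1) ((pmv ms)^[k] u) := by
  intro k
  induction k with
  | zero =>
    intro u d hec hemp hk
    simpa using ht_one_le N ms (N + 1) u
  | succ k ih =>
    intro u d hec hemp hk
    have h1 := ih u d hec hemp (by omega)
    have hempc : isEmpB N ((pmv ms)^[k] u) = true := ec_emp_mid hec (by omega)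
    have hc : (pmv ms)^[k] u ∈ children N ms ((pmv ms)^[k + 1] u) := by
      apply mem_children.mpr
      exact ⟨hempc, by rw [Function.iterate_succ_apply']⟩
    have hecw : ecb N ms ((pmv ms)^[k + 1] u) (d - (k + 1)) = true :=
      ec_shift hec (k + 1) (by omega)
    rw [ht_unfold hecw]
    have h2 := le_foldl_max_mem
      (g := fun c => htF N ms (N + 1) c + 1) hc 1
    push_cast
    omega

theorem A_eq_SM (n : Int) (ms : List Int) : find_max_depth n ms = SM n.toNat ms := by
  rw [A_eq]
  apply le_antisymm
  · apply foldl_max_le (SM_nonneg _ _)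
    intro r hr
    obtain ⟨hemp, hec⟩ := root_ec hr
    have := ht_le_SM n.toNat r 1 hec hemp (by omega)
    simpa using this
  · apply foldl_max_le (le_foldl_max_init _ _ _)
    intro e he
    by_cases hex : ∃ d : Nat, ecb n.toNat ms ((e : Int) + 1) d = true
    · obtain ⟨d, hd⟩ := hex
      rw [stepsOf_eq hd]
      have hemp : isEmpB n.toNat ((e : Int) + 1) = true := by
        simp only [isEmpB, Bool.and_eq_true, decide_eq_true_eq]
        simp only [List.mem_range] at he
        constructor <;> omega
      have hd1 : 1 ≤ d := by
        by_contra h0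
        have hd0 : d = 0 := by omega
        subst hd0
        simp only [ecb, Bool.and_eq_true, List.all_eq_true, List.mem_range, beq_iff_eq,
          Function.iterate_zero_apply] at hd
        simp only [isEmpB, Bool.and_eq_true, decide_eq_true_eq] at hemp
        omega
      have hrmem : (pmv ms)^[d - 1] ((e : Int) + 1) ∈ children n.toNat ms (-1) := by
        apply mem_children.mpr
        refine ⟨ec_emp_mid hd (by omega), ?_⟩
        have hpm : pmv ms ((pmv ms)^[d - 1] ((e : Int) + 1))
            = (pmv ms)^[d] ((e : Int) + 1) := by
          have h5 := (Function.iterate_succ_apply' (pmv ms) (d - 1) ((e : Int) + 1)).symm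
          rw [h5]
          congr 1
          omega
        rw [hpm]
        simp only [ecb, Bool.and_eq_true, List.all_eq_true, List.mem_range, beq_iff_eq] at hd
        exact hd.2
      have hge := ht_ge_chain (d - 1) ((e : Int) + 1) d hd hemp (by omega)
      have hcast : ((d - 1 : Nat) : Int) + 1 = (d : Int) := by omega
      rw [hcast] at hge
      calc (d : Int) ≤ htF n.toNat ms (n.toNat + 1) ((pmv ms)^[d - 1] ((e : Int) + 1)) := hge
        _ ≤ _ := le_foldl_max_mem (g := fun r => htF n.toNat ms (n.toNat + 1) r) hrmem 0
    · push Not at hex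
      have h0 : stepsOf n.toNat ms ((e : Int) + 1) = 0 :=
        stepsOf_eq_zero (fun d => by simpa using hex d)
      rw [h0]
      simpa using le_foldl_max_init (fun r => htF n.toNat ms (n.toNat + 1) r)
        (children n.toNat ms (-1)) 0

theorem ec_one_iff {N : Nat} {ms : List Int} {v : Int} :
    ecb N ms v 1 = true ↔ (isEmpB N v = true ∧ pmv ms v = -1) := by
  simp only [ecb, Bool.and_eq_true, List.all_eq_true, List.range_one, List.mem_singleton,
    beq_iff_eq, Function.iterate_one]
  constructor
  · rintro ⟨h1, h2⟩
    exact ⟨by simpa using h1 0 rfl, h2⟩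
  · rintro ⟨h1, h2⟩
    exact ⟨by rintro j rfl; simpa using h1, h2⟩

theorem mem_levelRoots {n : Int} {ms : List Int} {v : Int} :
    v ∈ levelRoots n ms ↔ (isEmpB n.toNat v = true ∧ ecb n.toNat ms v 1 = true) := by
  simp only [levelRoots, PySem.Set.mem_ofList, List.mem_map, List.mem_filter,
    PySem.List.mem_pyRange_one, beq_iff_eq]
  constructor
  · rintro ⟨e, ⟨⟨he0, hen⟩, hup⟩, rfl⟩
    have hemp : isEmpB n.toNat (e + 1) = true := by
      simp only [isEmpB, Bool.and_eq_true, decide_eq_true_eq]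
      omega
    refine ⟨hemp, ec_one_iff.mpr ⟨hemp, ?_⟩⟩
    simp only [pmv, upv, if_neg (show e + 1 ≠ -1 by omega), add_sub_cancel_right]
    exact hup
  · rintro ⟨hemp, hec⟩
    obtain ⟨_, hpm⟩ := ec_one_iff.mp hec
    simp only [isEmpB, Bool.and_eq_true, decide_eq_true_eq] at hemp
    refine ⟨v - 1, ⟨⟨by omega, by omega⟩, ?_⟩, by ring⟩
    simp only [pmv, upv, if_neg (show v ≠ -1 by omega)] at hpm
    exact hpm

theorem mem_levelNext {n : Int} {ms : List Int} {lvl : PySem.Set Int} {v : Int} :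
    v ∈ levelNext n ms lvl ↔ (isEmpB n.toNat v = true ∧ pmv ms v ∈ lvl) := by
  simp only [levelNext, PySem.Set.mem_ofList, List.mem_map, List.mem_filter,
    PySem.List.mem_pyRange_one, PySem.Set.contains_iff]
  constructor
  · rintro ⟨e, ⟨⟨he0, hen⟩, hc⟩, rfl⟩
    refine ⟨by simp only [isEmpB, Bool.and_eq_true, decide_eq_true_eq]; omega, ?_⟩
    simpa [pmv, upv, if_neg (show e + 1 ≠ -1 by omega), add_sub_cancel_right] using hc
  · rintro ⟨hemp, hmem⟩
    simp only [isEmpB, Bool.and_eq_true, decide_eq_true_eq] at hemp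
    refine ⟨v - 1, ⟨⟨by omega, by omega⟩, ?_⟩, by ring⟩
    simpa [pmv, upv, if_neg (show v ≠ -1 by omega)] using hmem

theorem bfs_eval {n : Int} {ms : List Int} :
    ∀ (f t : Nat) (lvl : PySem.Set Int), 1 ≤ t →
      (∀ v : Int, v ∈ lvl ↔ (isEmpB n.toNat v = true ∧ ecb n.toNat ms v t = true)) →
      (t = 1 ∨ ∃ v : Int, isEmpB n.toNat v = true ∧ ecb n.toNat ms v (t - 1) = true) →
      n.toNat + 2 ≤ f + t →
      bfsLoop n ms f lvl ((t : Int) - 1) = SM n.toNat ms := by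
  intro f
  induction f with
  | zero =>
    intro t lvl ht hmem hwit hfuel
    exfalso
    rcases hwit with rfl | ⟨v, _, hv2⟩
    · omega
    · have := ec_le hv2
      omega
  | succ f ih =>
    intro t lvl ht hmem hwit hfuel
    simp only [bfsLoop]
    by_cases hnil : lvl = []
    · rw [if_pos hnil]
      apply le_antisymm
      · rcases hwit with rfl | ⟨v, hv1, hv2⟩
        · simpa using SM_nonneg n.toNat ms
        · have h1 := d_le_SM hv2 hv1
          have hc : ((t - 1 : Nat) : Int) = (t : Int) - 1 := by omega
          omega
      · unfold SM
        apply foldl_max_le (by omega)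
        intro e he
        simp only [List.mem_range] at he
        by_cases hex : ∃ d : Nat, ecb n.toNat ms ((e : Int) + 1) d = true
        · obtain ⟨d, hd⟩ := hex
          rw [stepsOf_eq hd]
          by_contra hgt
          have hdt : t ≤ d := by omega
          have hw : (pmv ms)^[d - t] ((e : Int) + 1) ∈ lvl := by
            rw [hmem]
            refine ⟨ec_emp_mid hd (by omega), ?_⟩
            have h2 := ec_shift hd (d - t) (by omega)
            have hdd : d - (d - t) = t := by omega
            rwa [hdd] at h2
          rw [hnil] at hw
          simp at hw
        · push Not at hex
          rw [stepsOf_eq_zero (fun d => by simpa using hex d)]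
          simp only [Nat.cast_zero]
          omega
    · rw [if_neg hnil]
      have hstep : (t : Int) - 1 + 1 = ((t + 1 : Nat) : Int) - 1 := by push_cast; ring
      rw [hstep]
      apply ih (t + 1) _ (by omega) ?_ ?_ (by omega)
      · intro v
        rw [mem_levelNext]
        constructor
        · rintro ⟨hemp, hpm⟩
          obtain ⟨hemp2, hec2⟩ := (hmem _).mp hpm
          exact ⟨hemp, ec_succ_iff.mpr ⟨hemp, hec2⟩⟩
        · rintro ⟨hemp, hec⟩
          refine ⟨hemp, ?_⟩
          rw [hmem]
          obtain ⟨_, hecp⟩ := ec_succ_iff.mp hec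
          refine ⟨?_, hecp⟩
          have h3 := ec_emp_mid hec (show 1 < t + 1 by omega)
          simpa using h3
      · right
        obtain ⟨v, hv⟩ := List.exists_mem_of_ne_nil lvl hnil
        obtain ⟨h1, h2⟩ := (hmem v).mp hv
        exact ⟨v, h1, by simpa using h2⟩

theorem B_eq_SM (n : Int) (ms : List Int) : find_max_depth_alt n ms = SM n.toNat ms := by
  unfold find_max_depth_alt
  have h0 : (0 : Int) = ((1 : Nat) : Int) - 1 := by norm_num
  rw [h0]
  exact bfs_eval (n.toNat + 1) 1 _ le_rfl (fun v => mem_levelRoots) (Or.inl rfl) (by omega)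

-- ===== VERDICT (by name: the statement is the Claim_ definition above) =====
theorem find_max_depth_spec : Claim_equal_find_max_depth := by
  intro n ms _ _
  unfold Spec_find_max_depth
  rw [A_eq_SM, B_eq_SM]
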